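-- pv_equiv track=rewrite | github.com/zc-public/breakme-resources | cards/ulc/analyses/grouper.py | create_prefix_range_name
-- ===== SOURCE A (Python) =====
-- def split_command_prefix(prefix):
--     """Split a command prefix into its parts for grouping purposes."""
--     parts = prefix.split('-')
--
--     # Get main command and last part
--     if len(parts) >= 2:
--         main_parts = parts[:-1]
--         last_part = parts[-1]
--         return '-'.join(main_parts), last_part
--
--     return prefix, ""
--
-- def create_prefix_range_name(group):
--     """Create a name for a group of command prefixes."""
--     if not group:
--         return ""
--
--     # If all prefixes share the same main part
--     main_parts = [split_command_prefix(g[1])[0] for g in group]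
--
--     if all(part == main_parts[0] for part in main_parts):
--         main_part = main_parts[0]
--         # Get ranges of last parts
--         last_parts = [g[0] for g in group]
--
--         # If there's only one prefix in the group, just return it
--         if len(last_parts) == 1:
--             return group[0][1]
--
--         # Try to create ranges
--         ranges = []
--         range_start = last_parts[0]
--         prev_part = last_parts[0]
--
--         try:
--             for i in range(1, len(last_parts)):
--                 # Check if this is a continuation of the current range
--                 prev_val = int(prev_part, 16)
--                 curr_val = int(last_parts[i], 16)
--
--                 if curr_val != prev_val + 1:
--                     # End of range
--                     if range_start == prev_part:
--                         ranges.append(range_start)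
--                     else:
--                         ranges.append(f"{range_start}-{prev_part}")
--                     range_start = last_parts[i]
--
--                 prev_part = last_parts[i]
--
--             # Add the last range
--             if range_start == prev_part:
--                 ranges.append(range_start)
--             else:
--                 ranges.append(f"{range_start}-{prev_part}")
--
--             return f"{main_part}-[{', '.join(ranges)}]"
--         except ValueError:
--             # Fall back if we can't convert to integers
--             return f"{main_part}-[{', '.join(last_parts)}]"
--
--     # Just list all the prefixes
--     return ", ".join(g[1] for g in group)
-- ===== SOURCE B (Python) =====
-- def split_command_prefix(prefix):
--     """Split a command prefix into its parts for grouping purposes."""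
--     parts = prefix.split('-')
--     if len(parts) >= 2:
--         return '-'.join(parts[:-1]), parts[-1]
--     return prefix, ""
--
-- def fmt_run(run):
--     """Format one maximal consecutive run of last parts."""
--     return run[0] if len(run) == 1 else f"{run[0]}-{run[-1]}"
--
-- def create_prefix_range_name(group):
--     """Create a name for a group of command prefixes (cut-point decomposition).
--
--     A position belongs to the same run as its predecessor exactly when its
--     value minus its index is unchanged, so the run boundaries are the places
--     where the key v - i changes; slice the list at those cut points.
--     """
--     if not group:
--         return ""
--     main_part = split_command_prefix(group[0][1])[0]
--     if any(split_command_prefix(g[1])[0] != main_part for g in group):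
--         return ", ".join(g[1] for g in group)
--     if len(group) == 1:
--         return group[0][1]
--     last_parts = [g[0] for g in group]
--     try:
--         vals = [int(x, 16) for x in last_parts]
--     except ValueError:
--         return f"{main_part}-[{', '.join(last_parts)}]"
--     keys = [v - i for i, v in enumerate(vals)]
--     cuts = [i for i, (p, c) in enumerate(zip(keys, keys[1:]), 1) if c != p]
--     bounds = [0] + cuts + [len(last_parts)]
--     pieces = [fmt_run(last_parts[a:b]) for a, b in zip(bounds, bounds[1:])]
--     return f"{main_part}-[{', '.join(pieces)}]"
-- ===== Notes on version B (the rewrite author's own statement) =====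
-- stated objective: alternative
-- what changed: A's fused accumulator loop (tracking range_start/prev_part and appending formatted ranges as it scans) is replaced by a cut-point algorithm: compute the shift keys v - i once, take the indices where the key changes as cut points, and slice the list of last parts at those bounds, formatting each slice independently.
import Mathlib
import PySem

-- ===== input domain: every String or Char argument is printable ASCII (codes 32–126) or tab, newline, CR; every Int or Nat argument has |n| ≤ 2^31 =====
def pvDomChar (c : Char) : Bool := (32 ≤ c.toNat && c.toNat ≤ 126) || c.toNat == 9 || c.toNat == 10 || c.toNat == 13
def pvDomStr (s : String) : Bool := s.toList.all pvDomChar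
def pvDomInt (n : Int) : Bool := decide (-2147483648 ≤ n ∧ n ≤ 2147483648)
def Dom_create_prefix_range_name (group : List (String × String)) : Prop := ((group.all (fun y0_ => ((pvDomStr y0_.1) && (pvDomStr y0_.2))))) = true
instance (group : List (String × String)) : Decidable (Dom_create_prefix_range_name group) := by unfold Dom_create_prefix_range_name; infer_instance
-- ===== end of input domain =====

-- B replaces A's fused accumulator loop (range_start/prev_part state, formatting ranges
-- while scanning) by a cut-point algorithm: shift keys v - i, cut indices where the key
-- changes, slices of the list at those bounds; objective: alternative decomposition.

-- ===== PORT A =====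
-- helper shared by both sides (same helper in both Pythons)
def split_command_prefix (pfx : String) : String × String :=
  -- sep "-" ≠ "", so Python's split never raises: split? is `some` here and getD [] is exact
  let parts := (PySem.Str.split? pfx "-").getD []
  if 2 ≤ parts.length then
    -- parts[-1]: split always yields a nonempty list, so getLastD is exact here
    (PySem.Str.join "-" (PySem.List.slice parts none (some (-1))), parts.getLastD "")
  else (pfx, "")

-- A's `for i in range(1, len(last_parts))` loop with state (ranges, range_start, prev_part);
-- `none` = the ValueError caught by A's `except`.
def aLoop (ranges : List String) (range_start prev_part : String) (rest : List String) :
    Option (List String × String × String) :=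
  match rest with
  | [] => some (ranges, range_start, prev_part)
  | curr :: t =>
    match PySem.Int.ofStrBase? prev_part 16, PySem.Int.ofStrBase? curr 16 with
    | some prev_val, some curr_val =>
      if curr_val ≠ prev_val + 1 then
        aLoop (ranges ++ [if range_start = prev_part then range_start
                          else range_start ++ "-" ++ prev_part]) curr curr t
      else
        aLoop ranges range_start curr t
    | _, _ => none

def create_prefix_range_name (group : List (String × String)) : String :=
  if group = [] then "" else
  let main_parts := group.map (fun g => (split_command_prefix g.2).1)
  if main_parts.all (fun part => part = main_parts.headD "") then
    let main_part := main_parts.headD ""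
    let last_parts := group.map (fun g => g.1)
    if last_parts.length = 1 then ((group.headD ("", "")).2)
    else
      match aLoop [] (last_parts.headD "") (last_parts.headD "") last_parts.tail with
      | some (ranges, range_start, prev_part) =>
        main_part ++ "-[" ++
          PySem.Str.join ", " (ranges ++ [if range_start = prev_part then range_start
                                          else range_start ++ "-" ++ prev_part]) ++ "]"
      | none => main_part ++ "-[" ++ PySem.Str.join ", " last_parts ++ "]"
  else
    PySem.Str.join ", " (group.map (fun g => g.2))

-- ===== PORT B =====
-- run[0] / run[-1]: every slice taken at the cut bounds is nonempty, so headD/getLastD are exact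
def fmt_run (r : List String) : String :=
  if r.length = 1 then r.headD "" else r.headD "" ++ "-" ++ r.getLastD ""

def create_prefix_range_name_alt (group : List (String × String)) : String :=
  match group with
  | [] => ""
  | g0 :: _ =>
    let main_part := (split_command_prefix g0.2).1
    if group.any (fun g => (split_command_prefix g.2).1 ≠ main_part) then
      PySem.Str.join ", " (group.map (fun g => g.2))
    else if group.length = 1 then g0.2
    else
      let last_parts := group.map (fun g => g.1)
      match last_parts.mapM (fun s => PySem.Int.ofStrBase? s 16) with
      | none => main_part ++ "-[" ++ PySem.Str.join ", " last_parts ++ "]"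
      | some vals =>
        -- keys = [v - i for i, v in enumerate(vals)]
        let keys := (PySem.List.enumerate vals).map (fun p => p.2 - p.1)
        -- cuts = [i for i, (p, c) in enumerate(zip(keys, keys[1:]), 1) if c != p]
        let cuts := (PySem.List.enumerate (keys.zip keys.tail) 1).filterMap
            (fun q => if q.2.2 ≠ q.2.1 then some q.1 else none)
        let bounds := 0 :: (cuts ++ [(last_parts.length : Int)])
        -- pieces = [fmt_run(last_parts[a:b]) for a, b in zip(bounds, bounds[1:])]
        let pieces := (bounds.zip bounds.tail).map
            (fun q => fmt_run (PySem.List.slice last_parts (some q.1) (some q.2)))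
        main_part ++ "-[" ++ PySem.Str.join ", " pieces ++ "]"

-- ===== PRECONDITION & SPEC =====
def Spec_create_prefix_range_name (group : List (String × String)) (out : String) : Prop := out = create_prefix_range_name_alt group
instance (group : List (String × String)) (out : String) : Decidable (Spec_create_prefix_range_name group out) := by unfold Spec_create_prefix_range_name; infer_instance

-- ===== CLAIM (what is proved, stated in full; the proofs are below) =====
def Claim_equal_create_prefix_range_name : Prop := ∀ (group : List (String × String)), Dom_create_prefix_range_name group → Spec_create_prefix_range_name group (create_prefix_range_name group)

-- ===== LEMMAS AND PROOFS =====

-- conversion shorthand used only by the proofs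
def conv (s : String) : Option Int := PySem.Int.ofStrBase? s 16

-- proof-side reference: the runs A's loop walks through (current run, its last value, rest)
def runsAux (cur : List String) (prev : Int) (rest : List (String × Int)) : List (List String) :=
  match rest with
  | [] => [cur]
  | (s, v) :: t =>
    if v = prev + 1 then runsAux (cur ++ [s]) v t
    else cur :: runsAux [s] v t

-- proof-side reference: the cut positions, walking the value list with a position offset
def cutsRec : List Int → Int → List Int
  | [], _ => []
  | [_], _ => []
  | a :: b :: t, s => (if b ≠ a + 1 then [s+1] else []) ++ cutsRec (b :: t) (s+1)

-- successful mapM unpacked pointwise (small fact; no named library lemma for Option mapM here)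
lemma mapM_forall2 (l : List String) : ∀ v : List Int, l.mapM conv = some v →
    List.Forall₂ (fun s x => conv s = some x) l v := by
  induction l with
  | nil => intro v h; simp [List.mapM_nil] at h; subst h; constructor
  | cons a t ih =>
    intro v h
    rw [List.mapM_cons] at h
    cases ha : conv a with
    | none => rw [ha] at h; simp at h
    | some x =>
      rw [ha] at h
      cases ht : t.mapM conv with
      | none => rw [ht] at h; simp at h
      | some xs =>
        rw [ht] at h
        simp at h
        subst h
        exact List.Forall₂.cons ha (ih xs ht)

-- A's loop raises (returns none) as soon as some element of `rest` fails to convert,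
-- provided the running prev_part converts.
lemma aLoop_none (rest : List String) : ∀ (ranges : List String) (st pv : String) (v : Int),
    conv pv = some v → rest.mapM conv = none →
    aLoop ranges st pv rest = none := by
  induction rest with
  | nil => intro ranges st pv v hv hmap; simp [List.mapM_nil] at hmap
  | cons s t ih =>
    intro ranges st pv v hv hmap
    have hv' : PySem.Int.ofStrBase? pv 16 = some v := hv
    cases hs : PySem.Int.ofStrBase? s 16 with
    | none => simp only [aLoop]; simp only [hv', hs]
    | some w =>
      have ht : t.mapM conv = none := by
        cases htm : t.mapM conv with
        | none => rfl
        | some l =>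
          rw [List.mapM_cons, show conv s = some w from hs, htm] at hmap; simp at hmap
      simp only [aLoop]
      simp only [hv', hs]
      split_ifs <;> exact ih _ _ _ w hs ht

-- format of a finished run agrees between A (string-equality test) and B (length test),
-- given the run's head and last convert to values that differ when it is not a singleton.
lemma fmt_agree (cur : List String) (hcur : cur ≠ []) (hv lv : Int)
    (hhead : conv (cur.headD "") = some hv) (hlast : conv (cur.getLastD "") = some lv)
    (hlt : 1 < cur.length → hv < lv) :
    (if cur.headD "" = cur.getLastD "" then cur.headD ""
     else cur.headD "" ++ "-" ++ cur.getLastD "") = fmt_run cur := by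
  unfold fmt_run
  match cur, hcur with
  | [x], _ => simp
  | x :: y :: u, _ =>
    have h1 : 1 < (x :: y :: u).length := by simp
    have hne : (x :: y :: u).headD "" ≠ (x :: y :: u).getLastD "" := by
      intro he
      rw [he, hlast] at hhead
      injection hhead with h
      have := hlt h1
      omega
    rw [if_neg hne, if_neg (by simp : ¬ (x :: y :: u).length = 1)]

-- A-side invariant: on a fully convertible tail, A's loop followed by A's final-range append
-- produces exactly `ranges ++ map fmt_run (runsAux cur pv …)`.
lemma aLoop_eq_runs (rest : List String) (vrest : List Int)
    (hF : List.Forall₂ (fun s v => conv s = some v) rest vrest) :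
    ∀ (ranges : List String) (cur : List String), cur ≠ [] →
    ∀ (hv pv : Int), conv (cur.headD "") = some hv → conv (cur.getLastD "") = some pv →
    (1 < cur.length → hv < pv) →
    (match aLoop ranges (cur.headD "") (cur.getLastD "") rest with
     | some (rs, st, pv') =>
         some (rs ++ [if st = pv' then st else st ++ "-" ++ pv'])
     | none => none)
      = some (ranges ++ (runsAux cur pv (rest.zip vrest)).map fmt_run) := by
  induction hF with
  | nil =>
    intro ranges cur hcur hv pv hhead hlast hlt
    simp only [aLoop, List.zip_nil_right, runsAux, List.map]
    rw [fmt_agree cur hcur hv pv hhead hlast hlt]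
  | @cons s v t vt hsv htail ih =>
    intro ranges cur hcur hv pv hhead hlast hlt
    have hlast' : PySem.Int.ofStrBase? (cur.getLastD "") 16 = some pv := hlast
    have hsv' : PySem.Int.ofStrBase? s 16 = some v := hsv
    simp only [aLoop, List.zip_cons_cons, runsAux]
    simp only [hlast', hsv']
    by_cases hc : v = pv + 1
    · -- continuation: extend the current run
      have h1 : ((cur ++ [s]).headD "") = cur.headD "" := by
        cases cur with | nil => exact absurd rfl hcur | cons a u => rfl
      have h2 : ((cur ++ [s]).getLastD "") = s := by
        simp [List.getLastD_eq_getLast?]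
      have hlt' : 1 < (cur ++ [s]).length → hv < v := by
        intro _
        by_cases hl : 1 < cur.length
        · have := hlt hl; omega
        · match cur, hcur with
          | [x], _ =>
            rw [show ([x].headD "") = x from rfl] at hhead
            rw [show ([x].getLastD "") = x from rfl, hhead] at hlast
            injection hlast with h
            omega
          | x :: y :: u, _ => simp at hl
      have hrec := ih ranges (cur ++ [s]) (by simp) hv v
          (by rw [h1]; exact hhead) (by rw [h2]; exact hsv) hlt'
      rw [h1, h2] at hrec
      simp only [hc] at hrec ⊢
      simpa using hrec
    · -- break: close the current run, start a new one
      simp only [if_neg hc]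
      rw [if_pos (show v ≠ pv + 1 from hc)]
      rw [fmt_agree cur hcur hv pv hhead hlast hlt]
      have hrec := ih (ranges ++ [fmt_run cur]) [s] (by simp) v v hsv hsv (by simp)
      exact hrec.trans (by simp)

-- B-side: the port's keys/zip/enumerate cut computation is cutsRec
lemma cuts_eq : ∀ (w : List Int) (s : Int),
    ((PySem.List.enumerate
        (((PySem.List.enumerate w s).map (fun p => p.2 - p.1)).zip
          ((PySem.List.enumerate w s).map (fun p => p.2 - p.1)).tail) (s+1)).filterMap
      (fun q => if q.2.2 ≠ q.2.1 then some q.1 else none))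
    = cutsRec w s := by
  intro w
  induction w with
  | nil => intro s; rfl
  | cons a t ih =>
    intro s
    cases t with
    | nil => rfl
    | cons b t' =>
      have hrec := ih (s+1)
      simp only [PySem.List.enumerate_cons, List.map_cons, List.tail_cons, List.zip_cons_cons,
        List.filterMap_cons] at hrec ⊢
      have hcond : (b - (s + 1) ≠ a - s) ↔ (b ≠ a + 1) := by omega
      by_cases hb : b = a + 1
      · rw [if_neg (by simpa [hcond] using hb), cutsRec, if_neg (by simpa using hb)]
        simpa using hrec
      · rw [if_pos (by simpa [hcond] using hb), cutsRec, if_pos (by simpa using hb)]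
        simpa using hrec

-- B-side invariant: slicing `full` at the cut bounds yields exactly the runs.
lemma pieces_eq_runs (full : List String) :
    ∀ (rest : List String) (restv : List Int), rest.length = restv.length →
    ∀ (pre cur : List String), cur ≠ [] → full = pre ++ cur ++ rest → ∀ (pv : Int),
    ((((pre.length : Int) ::
          (cutsRec (pv :: restv) ((pre.length : Int) + (cur.length : Int) - 1) ++ [(full.length : Int)])).zip
        (cutsRec (pv :: restv) ((pre.length : Int) + (cur.length : Int) - 1) ++ [(full.length : Int)])).map
      (fun q => fmt_run (PySem.List.slice full (some q.1) (some q.2))))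
    = (runsAux cur pv (rest.zip restv)).map fmt_run := by
  intro rest
  induction rest with
  | nil =>
    intro restv hlen pre cur hcur hfull pv
    cases restv with
    | cons _ _ => simp at hlen
    | nil =>
      subst hfull
      simp only [cutsRec, List.nil_append, List.append_nil, List.zip_cons_cons,
        List.zip_nil_right, List.map_cons, List.map_nil, runsAux]
      rw [PySem.List.slice_natCast, List.drop_left]
      have h2 : (pre ++ cur).length - pre.length = cur.length := by simp
      rw [h2, List.take_length]
  | cons r t ih =>
    intro restv hlen pre cur hcur hfull pv
    cases restv with
    | nil => simp at hlen
    | cons w wt =>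
      have hlen' : t.length = wt.length := by simpa using hlen
      simp only [cutsRec, List.zip_cons_cons, runsAux]
      by_cases hb : w = pv + 1
      · -- continuation: the key does not change, no cut here
        rw [if_neg (by simpa using hb), if_pos hb, List.nil_append]
        have hfull' : full = pre ++ (cur ++ [r]) ++ t := by
          rw [hfull]; simp
        have hrec := ih wt hlen' pre (cur ++ [r]) (by simp) hfull' w
        have hsn : (pre.length : Int) + ((cur ++ [r]).length : Int) - 1
            = (pre.length : Int) + (cur.length : Int) - 1 + 1 := by
          push_cast [List.length_append, List.length_cons, List.length_nil]; ring
        rw [hsn] at hrec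
        exact hrec
      · -- break: a cut at position pre.length + cur.length, closing the current run
        rw [if_pos (by simpa using hb), if_neg hb]
        simp only [List.cons_append, List.nil_append, List.zip_cons_cons, List.map_cons]
        have hfull' : full = (pre ++ cur) ++ [r] ++ t := by
          rw [hfull]; simp
        have hrec := ih wt hlen' (pre ++ cur) [r] (by simp) hfull' w
        have hB : ((pre ++ cur).length : Int) + (([r] : List String).length : Int) - 1
            = (pre.length : Int) + (cur.length : Int) - 1 + 1 := by
          push_cast [List.length_append, List.length_cons, List.length_nil]; ring
        rw [hB] at hrec
        have hA : ((pre ++ cur).length : Int) = (pre.length : Int) + (cur.length : Int) - 1 + 1 := by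
          push_cast [List.length_append, List.length_cons, List.length_nil]; ring
        rw [hA] at hrec
        rw [hrec]
        -- head piece: the slice at (pre.length, pre.length + cur.length) is cur
        have hcast : (pre.length : Int) + (cur.length : Int) - 1 + 1
            = ((pre.length + cur.length : Nat) : Int) := by push_cast; ring
        have hslice : PySem.List.slice full (some (pre.length : Int))
            (some ((pre.length : Int) + (cur.length : Int) - 1 + 1)) = cur := by
          rw [hcast, PySem.List.slice_natCast]
          rw [hfull, List.append_assoc, List.drop_left]
          have : pre.length + cur.length - pre.length = cur.length := by omega
          rw [this, List.take_left]
        rw [hslice]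

-- the two guards agree: B's any-differs is the negation of A's all-equal
lemma guard_rel (g0 : String × String) (gs : List (String × String)) :
    ((g0 :: gs).any (fun g => (split_command_prefix g.2).1 ≠ (split_command_prefix g0.2).1))
    = !((g0 :: gs).all (fun g => (split_command_prefix g.2).1 = (split_command_prefix g0.2).1)) := by
  simp only [ne_eq, decide_not]
  exact List.not_all_eq_any_not.symm

-- ===== VERDICT (by name: the statement is the Claim_ definition above) =====
theorem create_prefix_range_name_spec : Claim_equal_create_prefix_range_name := by
  intro group _
  unfold Spec_create_prefix_range_name create_prefix_range_name create_prefix_range_name_alt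
  cases group with
  | nil => rfl
  | cons g0 gs =>
    simp only [if_neg (by simp : ¬ (g0 :: gs : List (String × String)) = [])]
    have hall : ((g0 :: gs).map (fun g => (split_command_prefix g.2).1)).all
          (fun part => part = ((g0 :: gs).map (fun g => (split_command_prefix g.2).1)).headD "")
        = (g0 :: gs).all (fun g => (split_command_prefix g.2).1 = (split_command_prefix g0.2).1) := by
      simp [List.all_map, Function.comp_def]
    rw [hall]
    by_cases hsame : ((g0 :: gs).all (fun g => (split_command_prefix g.2).1 = (split_command_prefix g0.2).1)) = true
    · have hanyf : ((g0 :: gs).any (fun g => (split_command_prefix g.2).1 ≠ (split_command_prefix g0.2).1)) = false := by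
        have h := guard_rel g0 gs
        rw [hsame] at h
        exact h
      rw [if_pos hsame,
        if_neg (show ¬ ((g0 :: gs).any (fun g => (split_command_prefix g.2).1 ≠ (split_command_prefix g0.2).1)) = true by rw [hanyf]; exact Bool.false_ne_true)]
      have hlen : ((g0 :: gs).map (fun g => g.1)).length = (g0 :: gs).length := by simp
      by_cases h1 : (g0 :: gs).length = 1
      · rw [if_pos (hlen.trans h1), if_pos h1, List.headD_cons]
      · rw [if_neg (fun h => h1 (hlen ▸ h)), if_neg h1]
        have hl : (g0 :: gs).map (fun g => g.1) = g0.1 :: gs.map (fun g => g.1) := rfl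
        rw [hl]
        simp only [List.map_cons, List.headD_cons, List.tail_cons]
        set l0 := g0.1 with hl0
        set lt := gs.map (fun g => g.1) with hlt0
        have htne : lt ≠ [] := by
          intro h
          apply h1
          rw [hlt0] at h
          simp at h
          simp [h]
        cases hm : (l0 :: lt).mapM (fun s => PySem.Int.ofStrBase? s 16) with
        | none =>
          -- both fall back; A's loop must return none
          cases h0 : conv l0 with
          | none =>
            obtain ⟨s1, t1, ht⟩ := List.exists_cons_of_ne_nil htne
            have hA : aLoop [] l0 l0 lt = none := by
              rw [ht]
              have h0' : PySem.Int.ofStrBase? l0 16 = none := h0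
              simp only [aLoop]
              simp only [h0']
            rw [hA]
          | some v0 =>
            have h0' : PySem.Int.ofStrBase? l0 16 = some v0 := h0
            have hltm : lt.mapM conv = none := by
              cases htm : lt.mapM (fun s => PySem.Int.ofStrBase? s 16) with
              | none => exact htm
              | some l =>
                rw [List.mapM_cons] at hm
                simp [h0', htm] at hm
            rw [aLoop_none lt [] l0 l0 v0 h0 hltm]
        | some vals =>
          have hF := mapM_forall2 (l0 :: lt) vals (by exact hm)
          cases hF with
          | cons h0 hFt =>
            rename_i v0 vt
            dsimp only
            -- B's cut list is cutsRec, B's pieces are the runs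
            have hcuts := cuts_eq (v0 :: vt) 0
            rw [show ((0 : Int) + 1) = 1 from by norm_num] at hcuts
            have hpieces := pieces_eq_runs (l0 :: lt) lt vt hFt.length_eq [] [l0]
                (by simp) (by simp) v0
            rw [show ((([] : List String).length : Int) + (([l0] : List String).length : Int) - 1)
                = (0 : Int) from by simp] at hpieces
            rw [show ((([] : List String).length : Int)) = (0 : Int) from by simp] at hpieces
            rw [hcuts, hpieces]
            -- A's loop followed by the final append produces the same runs
            have key := aLoop_eq_runs lt vt hFt [] [l0] (by simp) v0 v0 h0 h0 (by simp)
            cases hA : aLoop [] l0 l0 lt with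
            | none =>
              rw [show aLoop [] ([l0].headD "") ([l0].getLastD "") lt = none from hA] at key
              have key' : (none : Option (List String))
                  = some ([] ++ List.map fmt_run (runsAux [l0] v0 (lt.zip vt))) := key
              cases key'
            | some r =>
              obtain ⟨rs, st, pv2⟩ := r
              rw [show aLoop [] ([l0].headD "") ([l0].getLastD "") lt = some (rs, st, pv2) from hA] at key
              simp only [Option.some.injEq, List.nil_append] at key
              exact congrArg (fun l =>
                (split_command_prefix g0.2).1 ++ "-[" ++ PySem.Str.join ", " l ++ "]") key
    · rw [if_neg hsame,
        if_pos (show ((g0 :: gs).any (fun g => (split_command_prefix g.2).1 ≠ (split_command_prefix g0.2).1)) = true by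
          rw [guard_rel, Bool.eq_false_iff.mpr hsame]; rfl)]
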